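-- pv_equiv track=rewrite | github.com/accoumar12/dashboard | references/inspiration/filter_builder.py | _find_fk_path
-- ===== SOURCE A (Python) =====
-- def _find_fk_path(
--     graph: dict[str, list[tuple[str, str, list[tuple[str, str]]]]], src: str, dst: str
-- ):
--     """BFS to find a path of edges from src table to dst table. Returns list of edges."""
--     if src == dst:
--         return []
--     from collections import deque
--
--     queue = deque([src])
--     visited = {src}
--     parent: dict[str, tuple[str, tuple[str, str, list[tuple[str, str]]]]] = {}
--
--     while queue:
--         cur = queue.popleft()
--         for edge in graph.get(cur, []):
--             _from, to, _pairs = edge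
--             if to in visited:
--                 continue
--             visited.add(to)
--             parent[to] = (cur, edge)
--             if to == dst:
--                 # reconstruct path
--                 path: list[tuple[str, str, list[tuple[str, str]]]] = []
--                 node = dst
--                 while node != src:
--                     prev, e = parent[node]
--                     path.append(e)
--                     node = prev
--                 path.reverse()
--                 return path
--             queue.append(to)
--     return None
-- ===== SOURCE B (Python) =====
-- def _find_fk_path(
--     graph: dict[str, list[tuple[str, str, list[tuple[str, str]]]]], src: str, dst: str
-- ):
--     """Level-synchronous BFS carrying each node's edge path inline: no deque,
--     no parent map, no reconstruction pass. Per popped node we first probe its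
--     edge list for an edge straight to dst (A returns at exactly that edge,
--     since dst is never marked visited), otherwise we extend the next frontier."""
--     if src == dst:
--         return []
--     visited = {src}
--     frontier = [(src, [])]
--     while frontier:
--         nxt = []
--         for cur, path in frontier:
--             edges = graph.get(cur, [])
--             hit = next((e for e in edges if e[1] == dst), None)
--             if hit is not None:
--                 return path + [hit]
--             for e in edges:
--                 if e[1] not in visited:
--                     visited.add(e[1])
--                     nxt.append((e[1], path + [e]))
--         frontier = nxt
--     return None
-- ===== Notes on version B (the rewrite author's own statement) =====
-- stated objective: alternative
-- what changed: B replaces A's deque-plus-parent-map BFS (with its reverse path-reconstruction loop) by a level-synchronous BFS: the frontier list carries each node's edge path inline, and each popped node's edge list is first probed for a direct edge to dst (returned immediately) before extending the next frontier.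
import Mathlib
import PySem

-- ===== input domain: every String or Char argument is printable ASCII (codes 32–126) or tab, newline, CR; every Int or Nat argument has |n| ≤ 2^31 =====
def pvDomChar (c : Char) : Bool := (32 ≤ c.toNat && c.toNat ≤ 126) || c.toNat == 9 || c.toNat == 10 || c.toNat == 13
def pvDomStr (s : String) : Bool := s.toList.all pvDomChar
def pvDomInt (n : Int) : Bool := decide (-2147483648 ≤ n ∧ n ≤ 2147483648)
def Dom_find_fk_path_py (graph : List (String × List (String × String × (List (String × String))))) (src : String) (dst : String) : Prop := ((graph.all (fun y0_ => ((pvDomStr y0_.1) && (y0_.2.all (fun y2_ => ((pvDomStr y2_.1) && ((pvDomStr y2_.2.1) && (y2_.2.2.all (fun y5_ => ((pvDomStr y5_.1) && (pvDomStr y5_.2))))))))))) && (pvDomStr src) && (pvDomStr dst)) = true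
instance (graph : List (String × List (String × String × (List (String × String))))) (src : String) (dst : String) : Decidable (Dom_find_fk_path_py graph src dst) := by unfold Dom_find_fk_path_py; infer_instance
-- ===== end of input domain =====

-- B replaces A's deque + parent-map BFS (and its path-reconstruction loop) by a
-- level-synchronous BFS whose frontier carries each node's edge path inline,
-- probing each node's edge list for dst before extending (objective: alternative).

abbrev FkEdge := String × String × List (String × String)

-- ===== PORT A =====
-- the 'while node != src' reconstruction loop; fuel (never exhausted: the chain is
-- at most parent.size long) and the impossible missing-key case return acc.reverse
def fkReconA (src : String) (parent : PySem.Dict String (String × FkEdge)) :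
    Nat → String → List FkEdge → List FkEdge
  | 0, _, acc => acc.reverse
  | f + 1, node, acc =>
    if node = src then acc.reverse
    else
      match parent.get? node with
      | none => acc.reverse
      | some pe => fkReconA src parent f pe.1 (acc ++ [pe.2])

-- the 'for edge in graph.get(cur, [])' loop: returns either an early result (inl)
-- or the updated (visited, parent, queue) state (inr)
def fkForA (src dst cur : String) :
    List FkEdge → PySem.Set String → PySem.Dict String (String × FkEdge) → List String →
      (Option (List FkEdge)) ⊕ (PySem.Set String × PySem.Dict String (String × FkEdge) × List String)
  | [], v, p, q => Sum.inr (v, p, q)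
  | e :: rest, v, p, q =>
    if PySem.Set.contains v e.2.1 then fkForA src dst cur rest v p q
    else
      let v' := PySem.Set.add v e.2.1
      let p' := p.insert e.2.1 (cur, e)
      if e.2.1 = dst then Sum.inl (some (fkReconA src p' p'.size dst []))
      else fkForA src dst cur rest v' p' (q ++ [e.2.1])

-- the 'while queue' loop (fuel = total edge count + 2 always suffices: each pop
-- matches a push, and each push after the first marks a fresh node visited)
def fkBfsA (graph : PySem.Dict String (List FkEdge)) (src dst : String) :
    Nat → List String → PySem.Set String → PySem.Dict String (String × FkEdge) →
      Option (List FkEdge)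
  | 0, _, _, _ => none
  | _ + 1, [], _, _ => none
  | f + 1, cur :: q, v, p =>
    match fkForA src dst cur (graph.getD cur []) v p q with
    | Sum.inl r => r
    | Sum.inr (v', p', q') => fkBfsA graph src dst f q' v' p'

def find_fk_path_py (graph : List (String × List (String × String × (List (String × String))))) (src : String) (dst : String) : Option (List (String × String × (List (String × String)))) :=
  if src = dst then some []
  else
    fkBfsA (PySem.Dict.mk graph) src dst
      (graph.foldl (fun a g => a + g.2.length) 0 + 2)
      [src] (PySem.Set.ofList [src]) PySem.Dict.empty

-- ===== PORT B =====
-- 'next((e for e in edges if e[1] == dst), None)'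
def fkProbe (dst : String) (es : List FkEdge) : Option FkEdge :=
  es.find? (fun e => e.2.1 == dst)

-- the frontier-extension pass: 'for e in edges: if e[1] not in visited: …'
def fkExtend (pa : List FkEdge) (es : List FkEdge)
    (st : PySem.Set String × List (String × List FkEdge)) :
    PySem.Set String × List (String × List FkEdge) :=
  es.foldl (fun st e =>
    if PySem.Set.contains st.1 e.2.1 then st
    else (PySem.Set.add st.1 e.2.1, st.2 ++ [(e.2.1, pa ++ [e])])) st

-- the 'while frontier' / 'for cur, path in frontier' pair, fused: rem is the
-- unprocessed rest of the current level, the second state component the next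
-- frontier being built; fuel is spent once per popped node only
def fkRun (graph : PySem.Dict String (List FkEdge)) (dst : String) :
    Nat → List (String × List FkEdge) → PySem.Set String × List (String × List FkEdge) →
      Option (List FkEdge)
  | 0, _, _ => none
  | _ + 1, [], (_, []) => none
  | f + 1, [], (v, x :: xs) => fkRun graph dst (f + 1) (x :: xs) (v, [])
  | f + 1, (cur, pa) :: rem, (v, nxt) =>
    let es := graph.getD cur []
    match fkProbe dst es with
    | some e => some (pa ++ [e])
    | none => fkRun graph dst f rem (fkExtend pa es (v, nxt))
  termination_by f rem _ => 2 * f + (if rem.isEmpty then 1 else 0)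
  decreasing_by
    · simp [List.isEmpty]
    · simp only [List.isEmpty_cons]
      split <;> omega

def find_fk_path_py_alt (graph : List (String × List (String × String × (List (String × String))))) (src : String) (dst : String) : Option (List (String × String × (List (String × String)))) :=
  if src = dst then some []
  else
    fkRun (PySem.Dict.mk graph) dst
      ((graph.map (fun g => g.2.length)).sum + 2)
      [(src, [])] (PySem.Set.ofList [src], [])

-- ===== PRECONDITION & SPEC =====
def Spec_find_fk_path_py (graph : List (String × List (String × String × (List (String × String))))) (src : String) (dst : String) (out : Option (List (String × String × (List (String × String))))) : Prop := out = find_fk_path_py_alt graph src dst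
instance (graph : List (String × List (String × String × (List (String × String))))) (src : String) (dst : String) (out : Option (List (String × String × (List (String × String))))) : Decidable (Spec_find_fk_path_py graph src dst out) := by unfold Spec_find_fk_path_py; infer_instance

-- ===== CLAIM (what is proved, stated in full; the proofs are below) =====
def Claim_equal_find_fk_path_py : Prop := ∀ (graph : List (String × List (String × String × (List (String × String))))) (src : String) (dst : String), Dom_find_fk_path_py graph src dst → Spec_find_fk_path_py graph src dst (find_fk_path_py graph src dst)

-- ===== LEMMAS AND PROOFS =====

-- the two wrappers pass the same fuel
theorem fkFuelEq (graph : List (String × List FkEdge)) :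
    graph.foldl (fun a g => a + g.2.length) 0 = (graph.map (fun g => g.2.length)).sum := by
  have h : ∀ (l : List (String × List FkEdge)) (n : Nat),
      l.foldl (fun a g => a + g.2.length) n = n + (l.map (fun g => g.2.length)).sum := by
    intro l
    induction l with
    | nil => simp
    | cons x xs ih => intro n; simp [List.foldl, ih]; omega
  simpa using h graph 0

-- 'parent encodes exactly the edge path pa from src to n'
inductive FkChain (src : String) (parent : PySem.Dict String (String × FkEdge)) :
    String → List FkEdge → Prop
  | nil : FkChain src parent src []
  | cons {n prev : String} {e : FkEdge} {pa : List FkEdge} :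
      n ≠ src → parent.get? n = some (prev, e) → FkChain src parent prev pa →
      FkChain src parent n (pa ++ [e])

-- the reconstruction loop of A returns exactly the chain's path
theorem fkChain_recon {src : String} {parent : PySem.Dict String (String × FkEdge)}
    {n : String} {pa : List FkEdge} (h : FkChain src parent n pa) :
    ∀ (f : Nat) (acc : List FkEdge), pa.length ≤ f →
      fkReconA src parent f n acc = pa ++ acc.reverse := by
  induction h with
  | nil =>
    intro f acc _
    cases f with
    | zero => simp [fkReconA]
    | succ f => simp [fkReconA]
  | cons hne hget _ ih =>
    intro f acc hf
    cases f with
    | zero => simp at hf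
    | succ f =>
      simp only [fkReconA, if_neg hne, hget]
      rw [ih f (acc ++ [_]) (by simpa using hf)]
      simp

-- inserting a fresh key leaves every chain intact
theorem fkChain_insert {src t : String} {x : String × FkEdge}
    {parent : PySem.Dict String (String × FkEdge)} {n : String} {pa : List FkEdge}
    (ht : parent.get? t = none) (h : FkChain src parent n pa) :
    FkChain src (parent.insert t x) n pa := by
  induction h with
  | nil => exact .nil
  | cons hne hget hch ih =>
    rename_i n prev e' pa'
    have hneq : n ≠ t := fun he => by rw [he, ht] at hget; simp at hget
    exact .cons hne (by rw [PySem.Dict.get?_insert_of_ne _ x hneq, hget]) ih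

-- A's inner edge loop agrees with B's probe-then-extend pair: if some edge of cur
-- targets dst, A early-returns the path B's probe yields; otherwise A's loop is a
-- pure accumulation matching B's extension fold
theorem fkProbeExtend (src dst cur : String) :
    ∀ (es : List FkEdge) (v : PySem.Set String)
      (p : PySem.Dict String (String × FkEdge)) (nxt : List (String × List FkEdge))
      (qpre : List String) (pa : List FkEdge),
      src ∈ v → dst ∉ v → (∀ k x, p.get? k = some x → k ∈ v) →
      FkChain src p cur pa → pa.length ≤ p.size →
      (∀ np ∈ nxt, FkChain src p np.1 np.2 ∧ np.2.length ≤ p.size) →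
      (match fkProbe dst es with
       | some e => fkForA src dst cur es v p (qpre ++ nxt.map Prod.fst) = Sum.inl (some (pa ++ [e]))
       | none => ∃ v' p' nxt',
           fkExtend pa es (v, nxt) = (v', nxt') ∧
           fkForA src dst cur es v p (qpre ++ nxt.map Prod.fst)
             = Sum.inr (v', p', qpre ++ nxt'.map Prod.fst) ∧
           src ∈ v' ∧ dst ∉ v' ∧ (∀ k x, p'.get? k = some x → k ∈ v') ∧
           (∀ n q, FkChain src p n q → FkChain src p' n q) ∧
           p.size ≤ p'.size ∧
           (∀ np ∈ nxt', FkChain src p' np.1 np.2 ∧ np.2.length ≤ p'.size)) := by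
  intro es
  induction es with
  | nil =>
    intro v p nxt qpre pa hsrc hdst hkeys hch hlen hnxt
    exact ⟨v, p, nxt, rfl, rfl, hsrc, hdst, hkeys, fun _ _ h => h, le_refl _, hnxt⟩
  | cons e rest ih =>
    intro v p nxt qpre pa hsrc hdst hkeys hch hlen hnxt
    by_cases he : e.2.1 = dst
    · -- probe hits e: A takes the add branch (dst unvisited) and reconstructs pa ++ [e]
      subst he
      have hvis : PySem.Set.contains v e.2.1 = false := by
        cases h : PySem.Set.contains v e.2.1 with
        | false => rfl
        | true => exact absurd ((PySem.Set.contains_iff v e.2.1).mp h) hdst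
      have hgetnone : p.get? e.2.1 = none := by
        cases hg : p.get? e.2.1 with
        | none => rfl
        | some x => exact absurd (hkeys _ _ hg) hdst
      have hnc : p.contains e.2.1 = false :=
        (PySem.Dict.get?_eq_none_iff_contains p e.2.1).mp hgetnone
      have hsize : (p.insert e.2.1 (cur, e)).size = p.size + 1 := by
        rw [PySem.Dict.size_insert, if_neg (by simp [hnc])]
      have hnesrc : e.2.1 ≠ src := fun h => hdst (by rw [h]; exact hsrc)
      have hch' : FkChain src (p.insert e.2.1 (cur, e)) e.2.1 (pa ++ [e]) :=
        .cons hnesrc (PySem.Dict.get?_insert_self p e.2.1 (cur, e))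
          (fkChain_insert hgetnone hch)
      have hpr : fkProbe e.2.1 (e :: rest) = some e := by
        simp [fkProbe, List.find?]
      rw [hpr]
      simp only [fkForA, hvis, Bool.false_eq_true, if_false]
      rw [fkChain_recon hch' _ [] (by rw [hsize]; simp; omega)]
      simp
    · have hb : (e.2.1 == dst) = false := beq_eq_false_iff_ne.mpr he
      have hpr : fkProbe dst (e :: rest) = fkProbe dst rest := by
        simp only [fkProbe, List.find?, hb]
      rw [hpr]
      by_cases hvis : PySem.Set.contains v e.2.1 = true
      · have hmem : e.2.1 ∈ v := (PySem.Set.contains_iff v e.2.1).mp hvis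
        have hA : ∀ q, fkForA src dst cur (e :: rest) v p q = fkForA src dst cur rest v p q := by
          intro q; simp [fkForA, hmem]
        have hB : fkExtend pa (e :: rest) (v, nxt) = fkExtend pa rest (v, nxt) := by
          simp [fkExtend, List.foldl, hmem]
        rw [hA, hB] at *
        exact ih v p nxt qpre pa hsrc hdst hkeys hch hlen hnxt
      · have hnotmem : e.2.1 ∉ v := fun hm => hvis ((PySem.Set.contains_iff v e.2.1).mpr hm)
        have hvis' : PySem.Set.contains v e.2.1 = false := by
          cases h : PySem.Set.contains v e.2.1 with
          | false => rfl
          | true => exact absurd h hvis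
        have hgetnone : p.get? e.2.1 = none := by
          cases hg : p.get? e.2.1 with
          | none => rfl
          | some x => exact absurd (hkeys _ _ hg) hnotmem
        have hnc : p.contains e.2.1 = false :=
          (PySem.Dict.get?_eq_none_iff_contains p e.2.1).mp hgetnone
        have hsize : (p.insert e.2.1 (cur, e)).size = p.size + 1 := by
          rw [PySem.Dict.size_insert, if_neg (by simp [hnc])]
        have hnesrc : e.2.1 ≠ src := fun h => hnotmem (h ▸ hsrc)
        have hch' : FkChain src (p.insert e.2.1 (cur, e)) e.2.1 (pa ++ [e]) :=
          .cons hnesrc (PySem.Dict.get?_insert_self p e.2.1 (cur, e))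
            (fkChain_insert hgetnone hch)
        have hA : fkForA src dst cur (e :: rest) v p (qpre ++ nxt.map Prod.fst)
            = fkForA src dst cur rest (PySem.Set.add v e.2.1) (p.insert e.2.1 (cur, e))
                (qpre ++ (nxt ++ [(e.2.1, pa ++ [e])]).map Prod.fst) := by
          simp [fkForA, hnotmem, he]
        have hB : fkExtend pa (e :: rest) (v, nxt)
            = fkExtend pa rest (PySem.Set.add v e.2.1, nxt ++ [(e.2.1, pa ++ [e])]) := by
          simp [fkExtend, List.foldl, hnotmem]
        rw [hA, hB]
        have ihres := ih (PySem.Set.add v e.2.1) (p.insert e.2.1 (cur, e))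
          (nxt ++ [(e.2.1, pa ++ [e])]) qpre pa
          ((PySem.Set.mem_add v e.2.1 src).mpr (Or.inl hsrc))
          (fun hm => by
            rcases (PySem.Set.mem_add v e.2.1 dst).mp hm with h | h
            · exact hdst h
            · exact he h.symm)
          (fun k x hk => by
            by_cases hke : k = e.2.1
            · exact (PySem.Set.mem_add v e.2.1 k).mpr (Or.inr hke)
            · rw [PySem.Dict.get?_insert_of_ne p (cur, e) hke] at hk
              exact (PySem.Set.mem_add v e.2.1 k).mpr (Or.inl (hkeys _ _ hk)))
          (fkChain_insert hgetnone hch)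
          (by omega)
          (fun np hnp => by
            rcases List.mem_append.mp hnp with h | h
            · obtain ⟨hc, hl⟩ := hnxt np h
              exact ⟨fkChain_insert hgetnone hc, by omega⟩
            · simp only [List.mem_singleton] at h
              subst h
              exact ⟨hch', by simp [hsize]; omega⟩)
        cases hp : fkProbe dst rest with
        | some e' =>
          rw [hp] at ihres
          exact ihres
        | none =>
          rw [hp] at ihres
          obtain ⟨v', p', nxt', h1, h2, h3, h4, h5, h6, h7, h8⟩ := ihres
          exact ⟨v', p', nxt', h1, h2, h3, h4, h5,
            fun n q hq => h6 n q (fkChain_insert hgetnone hq),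
            by omega, h8⟩

-- the two top-level loops agree: A's FIFO queue is always B's remaining current
-- level followed by B's next frontier, and both spend one fuel unit per pop
theorem fkRunAB (graph : PySem.Dict String (List FkEdge)) (src dst : String) :
    ∀ (f : Nat) (rem nxt : List (String × List FkEdge)) (v : PySem.Set String)
      (p : PySem.Dict String (String × FkEdge)),
      src ∈ v → dst ∉ v → (∀ k x, p.get? k = some x → k ∈ v) →
      (∀ np ∈ rem ++ nxt, FkChain src p np.1 np.2 ∧ np.2.length ≤ p.size) →
      fkBfsA graph src dst f (rem.map Prod.fst ++ nxt.map Prod.fst) v p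
        = fkRun graph dst f rem (v, nxt) := by
  intro f
  induction f with
  | zero => intro rem nxt v p _ _ _ _; simp [fkBfsA, fkRun]
  | succ f ih =>
    intro rem nxt v p hsrc hdst hkeys hmem
    have hcons : ∀ (cur : String) (pa : List FkEdge)
        (rem nxt : List (String × List FkEdge)) (v : PySem.Set String)
        (p : PySem.Dict String (String × FkEdge)),
        src ∈ v → dst ∉ v → (∀ k x, p.get? k = some x → k ∈ v) →
        (∀ np ∈ (cur, pa) :: rem ++ nxt, FkChain src p np.1 np.2 ∧ np.2.length ≤ p.size) →
        fkBfsA graph src dst (f + 1) (((cur, pa) :: rem).map Prod.fst ++ nxt.map Prod.fst) v p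
          = fkRun graph dst (f + 1) ((cur, pa) :: rem) (v, nxt) := by
      intro cur pa rem nxt v p hsrc hdst hkeys hmem
      obtain ⟨hch, hlen⟩ := hmem (cur, pa) (List.mem_cons_self ..)
      have hrest : ∀ np ∈ rem ++ nxt, FkChain src p np.1 np.2 ∧ np.2.length ≤ p.size :=
        fun np hnp => hmem np (List.mem_cons_of_mem _ hnp)
      have hnxt : ∀ np ∈ nxt, FkChain src p np.1 np.2 ∧ np.2.length ≤ p.size :=
        fun np hnp => hrest np (List.mem_append.mpr (Or.inr hnp))
      have hpe := fkProbeExtend src dst cur (graph.getD cur []) v p nxt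
        (rem.map Prod.fst) pa hsrc hdst hkeys hch hlen hnxt
      cases hp : fkProbe dst (graph.getD cur []) with
      | some e =>
        rw [hp] at hpe
        simp only [List.map_cons, List.cons_append, fkBfsA, hpe, fkRun, hp]
      | none =>
        rw [hp] at hpe
        obtain ⟨v', p', nxt', h1, h2, h3, h4, h5, h6, h7, h8⟩ := hpe
        simp only [List.map_cons, List.cons_append, fkBfsA, h2, fkRun, hp, h1]
        exact ih rem nxt' v' p' h3 h4 h5
          (fun np hnp => by
            rcases List.mem_append.mp hnp with h | h
            · obtain ⟨hc, hl⟩ := hrest np (List.mem_append.mpr (Or.inl h))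
              exact ⟨h6 _ _ hc, by omega⟩
            · exact h8 np h)
    cases rem with
    | cons x xs =>
      obtain ⟨cur, pa⟩ := x
      exact hcons cur pa xs nxt v p hsrc hdst hkeys hmem
    | nil =>
      cases nxt with
      | nil => simp [fkBfsA, fkRun]
      | cons x xs =>
        obtain ⟨cur, pa⟩ := x
        have : fkRun graph dst (f + 1) [] (v, (cur, pa) :: xs)
            = fkRun graph dst (f + 1) ((cur, pa) :: xs) (v, []) := by
          rw [fkRun]
        rw [this]
        have := hcons cur pa xs [] v p hsrc hdst hkeys
          (by simpa using hmem)
        simpa using this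

-- ===== VERDICT (by name: the statement is the Claim_ definition above) =====
theorem find_fk_path_py_spec : Claim_equal_find_fk_path_py := by
  intro graph src dst _
  unfold Spec_find_fk_path_py find_fk_path_py find_fk_path_py_alt
  by_cases h : src = dst
  · simp [h]
  · simp only [if_neg h]
    rw [fkFuelEq]
    have hsrc : src ∈ PySem.Set.ofList [src] := by
      simp [PySem.Set.ofList, PySem.Set.add, PySem.Set.empty]
    have hdst : dst ∉ PySem.Set.ofList [src] := by
      intro hm
      rw [PySem.Set.mem_ofList] at hm
      simp only [List.mem_singleton] at hm
      exact h hm.symm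
    have := fkRunAB (PySem.Dict.mk graph) src dst
      ((graph.map (fun g => g.2.length)).sum + 2) [(src, [])] []
      (PySem.Set.ofList [src]) PySem.Dict.empty hsrc hdst
      (fun k x hk => by simp [PySem.Dict.get?, PySem.Dict.empty] at hk)
      (fun np hnp => by
        simp only [List.append_nil, List.mem_singleton] at hnp
        subst hnp
        exact ⟨.nil, by simp⟩)
    simpa using this
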